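-- pv_equiv track=rewrite | github.com/mccgr/edgar | cusip_cik/extract_cusips.py | calculate_cusip_check_digit
-- ===== SOURCE A (Python) =====
-- def calculate_cusip_check_digit(cusip):
--
--     values = {'0': 0, '1': 1, '2': 2, '3': 3, '4': 4, '5': 5, '6': 6, '7': 7, '8': 8, '9': 9,
--               'A': 10, 'B':11, 'C': 12, 'D': 13, 'E':14, 'F': 15, 'G': 16, 'H': 17, 'I': 18, 'J': 19,
--               'K': 20, 'L': 21, 'M': 22, 'N': 23, 'O': 24, 'P': 25, 'Q': 26, 'R': 27, 'S': 28, 'T': 29,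
--               'U': 30, 'V': 31, 'W': 32, 'X': 33, 'Y': 34, 'Z': 35, '*': 36, '@': 37, '#': 38
--                }
--
--     digit_str = ''
--
--     if(len(cusip) >= 8):
--
--         for i in range(8):
--
--             if(i % 2 == 0):
--                 digit_str = digit_str + str(values[cusip[i]])
--             else:
--                 digit_str = digit_str + str(2 * values[cusip[i]])
--
--         result = 0
--
--         for i in range(len(digit_str)):
--
--             result = result + int(digit_str[i])
--
--         result = (10 - result) % 10
--
--         return(result)
--
--     elif(len(cusip) >= 6):
--
--         for i in range(6):
--
--             if(i % 2 == 0):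
--                 digit_str = digit_str + str(values[cusip[i]])
--             else:
--                 digit_str = digit_str + str(2 * values[cusip[i]])
--
--         result = 0
--
--         for i in range(len(digit_str)):
--
--             result = result + int(digit_str[i])
--
--         result = (10 - result) % 10
--
--         return(result)
--
--     elif(len(cusip) >= 3):
--
--         cusip = '0' * (9 - len(cusip)) + cusip
--
--         for i in range(8):
--
--             if(i % 2 == 0):
--                 digit_str = digit_str + str(values[cusip[i]])
--             else:
--                 digit_str = digit_str + str(2 * values[cusip[i]])
--
--         result = 0
--
--         for i in range(len(digit_str)):
--
--             result = result + int(digit_str[i])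
--
--         result = (10 - result) % 10
--
--         return(result)
--
--     else:
--
--         return(None)
-- ===== SOURCE B (Python) =====
-- def calculate_cusip_check_digit(cusip):
--
--     values = {'0': 0, '1': 1, '2': 2, '3': 3, '4': 4, '5': 5, '6': 6, '7': 7, '8': 8, '9': 9,
--               'A': 10, 'B':11, 'C': 12, 'D': 13, 'E':14, 'F': 15, 'G': 16, 'H': 17, 'I': 18, 'J': 19,
--               'K': 20, 'L': 21, 'M': 22, 'N': 23, 'O': 24, 'P': 25, 'Q': 26, 'R': 27, 'S': 28, 'T': 29,
--               'U': 30, 'V': 31, 'W': 32, 'X': 33, 'Y': 34, 'Z': 35, '*': 36, '@': 37, '#': 38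
--                }
--
--     n = len(cusip)
--     if n >= 8:
--         window = cusip[:8]
--     elif n >= 6:
--         window = cusip[:6]
--     elif n >= 3:
--         window = ('0' * (9 - n) + cusip)[:8]
--     else:
--         return None
--
--     total = 0
--     for i, c in enumerate(window):
--         v = values[c] if i % 2 == 0 else 2 * values[c]
--         total += v // 10 + v % 10
--
--     return (10 - total) % 10
-- ===== Notes on version B (the rewrite author's own statement) =====
-- stated objective: simpler
-- what changed: B selects the scanned window once and accumulates the check sum in a single pass using v//10+v%10 per character, instead of A's three duplicated branches that each build an intermediate digit string and then rescan it character by character with int().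
import Mathlib
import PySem

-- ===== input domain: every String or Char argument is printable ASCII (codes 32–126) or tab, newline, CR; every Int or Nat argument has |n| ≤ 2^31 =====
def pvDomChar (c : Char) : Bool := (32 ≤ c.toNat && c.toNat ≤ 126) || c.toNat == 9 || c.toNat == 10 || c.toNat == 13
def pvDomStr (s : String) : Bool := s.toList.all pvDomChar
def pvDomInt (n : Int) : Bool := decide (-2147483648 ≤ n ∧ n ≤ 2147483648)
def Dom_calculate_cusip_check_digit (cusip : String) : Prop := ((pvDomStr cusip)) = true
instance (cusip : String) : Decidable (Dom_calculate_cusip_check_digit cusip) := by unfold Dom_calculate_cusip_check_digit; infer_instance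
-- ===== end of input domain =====

-- B replaces A's three duplicated build-digit-string-then-rescan branches by one window
-- selection plus a single accumulation pass (v//10 + v%10 per character); same return values.

-- ===== PORT A =====
-- the 'values' dict of the Python source (keys are the 1-character strings, modelled as Char)
def pvValues : PySem.Dict Char Int := PySem.Dict.ofList
  [('0',0),('1',1),('2',2),('3',3),('4',4),('5',5),('6',6),('7',7),('8',8),('9',9),
   ('A',10),('B',11),('C',12),('D',13),('E',14),('F',15),('G',16),('H',17),('I',18),('J',19),
   ('K',20),('L',21),('M',22),('N',23),('O',24),('P',25),('Q',26),('R',27),('S',28),('T',29),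
   ('U',30),('V',31),('W',32),('X',33),('Y',34),('Z',35),('*',36),('@',37),('#',38)]

-- the loop 'for i in range(k): digit_str += str(values[cusip[i]]) / str(2*values[cusip[i]])'
-- (none = a KeyError/IndexError inside the loop)
def pvBuildLoop (cs : List Char) (k : Int) : Option (List Char) :=
  (PySem.List.pyRange 0 k 1).foldl
    (fun acc i =>
      acc.bind fun ds =>
        (PySem.List.pyGet? cs i).bind fun c =>
          (PySem.Dict.get? pvValues c).bind fun v =>
            some (ds ++ PySem.Int.toChars (if PySem.Int.mod i 2 = 0 then v else 2 * v)))
    (some [])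

-- the loop 'for i in range(len(digit_str)): result += int(digit_str[i])'
def pvSumLoop (ds : List Char) : Option Int :=
  (PySem.List.pyRange 0 (ds.length : Int) 1).foldl
    (fun acc i =>
      acc.bind fun r =>
        (PySem.List.pyGet? ds i).bind fun c =>
          (PySem.Int.ofChars? [c]).bind fun d =>
            some (r + d))
    (some 0)

-- the block repeated verbatim in each of A's three branches: build digit_str over range(k),
-- sum its digits, return (10 - result) % 10
def pvABlock (cs : List Char) (k : Int) : Option Int :=
  (pvBuildLoop cs k).bind fun ds =>
    (pvSumLoop ds).bind fun r =>
      some (PySem.Int.mod (10 - r) 10)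

def calculate_cusip_check_digit (cusip : String) : Option Int :=
  let cs := cusip.toList
  if 8 ≤ cs.length then pvABlock cs 8
  else if 6 ≤ cs.length then pvABlock cs 6
  else if 3 ≤ cs.length then
    -- cusip = '0' * (9 - len(cusip)) + cusip  ('0'*(9-n) is exact as replicate: 9-n > 0 here)
    pvABlock (List.replicate (9 - cs.length) '0' ++ cs) 8
  else none

-- ===== PORT B =====
def calculate_cusip_check_digit_alt (cusip : String) : Option Int :=
  let cs := cusip.toList
  let n := cs.length
  let window? : Option (List Char) :=
    if 8 ≤ n then some (PySem.List.slice cs none (some 8))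
    else if 6 ≤ n then some (PySem.List.slice cs none (some 6))
    else if 3 ≤ n then some (PySem.List.slice (List.replicate (9 - n) '0' ++ cs) none (some 8))
    else none
  window?.bind fun w =>
    ((PySem.List.enumerate w 0).foldl
      (fun acc p =>
        acc.bind fun t =>
          (PySem.Dict.get? pvValues p.2).bind fun v0 =>
            let v := if PySem.Int.mod p.1 2 = 0 then v0 else 2 * v0
            some (t + PySem.Int.floordiv v 10 + PySem.Int.mod v 10))
      (some 0)).bind fun total =>
      some (PySem.Int.mod (10 - total) 10)

-- ===== PRECONDITION & SPEC =====
def pvCusipAlphabet : List Char := "0123456789ABCDEFGHIJKLMNOPQRSTUVWXYZ*@#".toList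

-- Pre_ excludes exactly the inputs on which Python A raises a KeyError: a character outside
-- the 39-character CUSIP alphabet occurring in the window of characters the code actually scans.
def Pre_calculate_cusip_check_digit (cusip : String) : Prop :=
  let cs := cusip.toList
  let k : Nat := if 8 ≤ cs.length then 8 else if 6 ≤ cs.length then 6
                 else if 3 ≤ cs.length then cs.length - 1 else 0
  ((cs.take k).all (fun c => c ∈ pvCusipAlphabet)) = true
instance (cusip : String) : Decidable (Pre_calculate_cusip_check_digit cusip) := by
  unfold Pre_calculate_cusip_check_digit; infer_instance

def pvWitness_calculate_cusip_check_digit : String := "037833100"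

def Spec_calculate_cusip_check_digit (cusip : String) (out : Option Int) : Prop := out = calculate_cusip_check_digit_alt cusip
instance (cusip : String) (out : Option Int) : Decidable (Spec_calculate_cusip_check_digit cusip out) := by unfold Spec_calculate_cusip_check_digit; infer_instance

-- ===== CLAIM (what is proved, stated in full; the proofs are below) =====
def Claim_equal_calculate_cusip_check_digit : Prop := ∀ (cusip : String), Dom_calculate_cusip_check_digit cusip → Pre_calculate_cusip_check_digit cusip → Spec_calculate_cusip_check_digit cusip (calculate_cusip_check_digit cusip)

-- ===== LEMMAS AND PROOFS =====

-- proof-side value table (equals the dict lookup on the alphabet; lemma pv_get?_alpha)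
def pvValOf (c : Char) : Int :=
  ((PySem.Dict.get? pvValues c).getD 0)

set_option maxRecDepth 8192 in
theorem pv_get?_alpha {c : Char} (h : c ∈ pvCusipAlphabet) :
    PySem.Dict.get? pvValues c = some (pvValOf c) := by
  have : pvCusipAlphabet.all
      (fun c => (PySem.Dict.get? pvValues c == some (pvValOf c))) = true := by decide
  have := List.all_eq_true.mp this c h
  exact eq_of_beq this

-- per-character contribution B adds for index i
def pvContrib (i : Int) (c : Char) : Int :=
  let v := if PySem.Int.mod i 2 = 0 then pvValOf c else 2 * pvValOf c
  PySem.Int.floordiv v 10 + PySem.Int.mod v 10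

-- sum loop as a fold over the characters
def pvSumFold (ds : List Char) (acc : Option Int) : Option Int :=
  ds.foldl
    (fun acc c =>
      acc.bind fun r =>
        (PySem.Int.ofChars? [c]).bind fun d => some (r + d)) acc

theorem pvGet_window (ds : List Char) (i : Int) (h0 : 0 ≤ i) (h1 : i < (ds.length : Int)) :
    PySem.List.pyGet? ds i = some (PySem.List.pyGetD ds i 'x') := by
  rw [PySem.List.pyGet?_of_nonneg ds h0, PySem.List.pyGetD_eq_getElem ds 'x' h0 h1]
  exact List.getElem?_eq_getElem (by omega)

theorem pvSumLoop_eq_fold (ds : List Char) : pvSumLoop ds = pvSumFold ds (some 0) := by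
  unfold pvSumLoop pvSumFold
  rw [PySem.List.foldl_congr_mem _ _
      (fun acc i =>
        (fun (acc : Option Int) (c : Char) =>
          acc.bind fun r => (PySem.Int.ofChars? [c]).bind fun d => some (r + d))
        acc (PySem.List.pyGetD ds i 'x')) _
      (by
        intro acc i hi
        obtain ⟨h0, h1⟩ := PySem.List.mem_pyRange_one.mp hi
        simp only [pvGet_window ds i h0 h1, Option.bind_some])]
  exact PySem.List.foldl_pyRange_zero_pyGetD' ds 'x'
      (fun acc c => acc.bind fun r => (PySem.Int.ofChars? [c]).bind fun d => some (r + d)) (some 0)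

theorem pvSumFold_append (ds es : List Char) (a : Option Int) :
    pvSumFold (ds ++ es) a = pvSumFold es (pvSumFold ds a) := by
  simp [pvSumFold, List.foldl_append]

theorem pvSumFold_none (ds : List Char) : pvSumFold ds none = none := by
  induction ds with
  | nil => rfl
  | cons c t ih => simpa [pvSumFold] using ih

theorem pvSumFold_shift (ds : List Char) (r : Int) :
    pvSumFold ds (some r) = (pvSumFold ds (some 0)).map (r + ·) := by
  induction ds generalizing r with
  | nil => simp [pvSumFold]
  | cons c t ih =>
    simp only [pvSumFold, List.foldl_cons, Option.bind_some]
    cases h : PySem.Int.ofChars? [c] with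
    | none =>
      show pvSumFold t none = (pvSumFold t none).map (r + ·)
      simp [pvSumFold_none]
    | some d =>
      show pvSumFold t (some (r + d)) = (pvSumFold t (some (0 + d))).map (r + ·)
      rw [ih (r + d), ih (0 + d), Option.map_map]
      congr 1
      funext x
      simp [add_assoc]

set_option maxRecDepth 8192 in
theorem pvSumFold_val (c : Char) (h : c ∈ pvCusipAlphabet) :
    pvSumFold (PySem.Int.toChars (pvValOf c)) (some 0)
      = some (PySem.Int.floordiv (pvValOf c) 10 + PySem.Int.mod (pvValOf c) 10) := by
  have : pvCusipAlphabet.all (fun c =>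
      pvSumFold (PySem.Int.toChars (pvValOf c)) (some 0)
        == some (PySem.Int.floordiv (pvValOf c) 10 + PySem.Int.mod (pvValOf c) 10)) = true := by
    decide
  exact eq_of_beq (List.all_eq_true.mp this c h)

set_option maxRecDepth 8192 in
theorem pvSumFold_val2 (c : Char) (h : c ∈ pvCusipAlphabet) :
    pvSumFold (PySem.Int.toChars (2 * pvValOf c)) (some 0)
      = some (PySem.Int.floordiv (2 * pvValOf c) 10 + PySem.Int.mod (2 * pvValOf c) 10) := by
  have : pvCusipAlphabet.all (fun c =>
      pvSumFold (PySem.Int.toChars (2 * pvValOf c)) (some 0)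
        == some (PySem.Int.floordiv (2 * pvValOf c) 10 + PySem.Int.mod (2 * pvValOf c) 10)) = true := by
    decide
  exact eq_of_beq (List.all_eq_true.mp this c h)

theorem pvSumFold_digits {c : Char} (h : c ∈ pvCusipAlphabet) (i r : Int) :
    pvSumFold (PySem.Int.toChars (if PySem.Int.mod i 2 = 0 then pvValOf c else 2 * pvValOf c))
        (some r) = some (r + pvContrib i c) := by
  unfold pvContrib
  by_cases h2 : PySem.Int.mod i 2 = 0 <;>
    simp only [h2, if_pos, if_neg, not_false_iff] <;>
    [rw [pvSumFold_shift, pvSumFold_val c h]; rw [pvSumFold_shift, pvSumFold_val2 c h]] <;> rfl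

-- A's build loop over a window w (start index s), all characters in the alphabet
theorem pvBuild_enum (w : List Char) (s : Int) (ds : List Char)
    (hall : ∀ c ∈ w, c ∈ pvCusipAlphabet) :
    (PySem.List.enumerate w s).foldl
      (fun acc (p : Int × Char) =>
        acc.bind fun ds =>
          (PySem.Dict.get? pvValues p.2).bind fun v =>
            some (ds ++ PySem.Int.toChars (if PySem.Int.mod p.1 2 = 0 then v else 2 * v)))
      (some ds)
    = some (ds ++ (PySem.List.enumerate w s).flatMap
        (fun p => PySem.Int.toChars
          (if PySem.Int.mod p.1 2 = 0 then pvValOf p.2 else 2 * pvValOf p.2))) := by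
  induction w generalizing s ds with
  | nil => simp [PySem.List.enumerate_nil]
  | cons c t ih =>
    rw [PySem.List.enumerate_cons]
    simp only [List.foldl_cons, List.flatMap_cons, Option.bind_some,
      pv_get?_alpha (hall c (List.mem_cons_self)), Option.bind_some]
    rw [ih (s + 1) _ (fun x hx => hall x (List.mem_cons_of_mem c hx))]
    simp [List.append_assoc]

theorem pvB_enum (w : List Char) (s t : Int)
    (hall : ∀ c ∈ w, c ∈ pvCusipAlphabet) :
    (PySem.List.enumerate w s).foldl
      (fun acc (p : Int × Char) =>
        acc.bind fun t =>
          (PySem.Dict.get? pvValues p.2).bind fun v0 =>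
            let v := if PySem.Int.mod p.1 2 = 0 then v0 else 2 * v0
            some (t + PySem.Int.floordiv v 10 + PySem.Int.mod v 10))
      (some t)
    = some (t + ((PySem.List.enumerate w s).map (fun p => pvContrib p.1 p.2)).sum) := by
  induction w generalizing s t with
  | nil => simp [PySem.List.enumerate_nil]
  | cons c tl ih =>
    rw [PySem.List.enumerate_cons]
    simp only [List.foldl_cons, List.map_cons, List.sum_cons, Option.bind_some,
      pv_get?_alpha (hall c (List.mem_cons_self)), Option.bind_some]
    rw [ih (s + 1) _ (fun x hx => hall x (List.mem_cons_of_mem c hx))]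
    congr 1
    unfold pvContrib
    by_cases h2 : PySem.Int.mod s 2 = 0 <;> simp only [h2, if_pos, if_neg, not_false_iff] <;> ring

theorem pvSumFold_flat (w : List Char) (s : Int) (r : Int)
    (hall : ∀ c ∈ w, c ∈ pvCusipAlphabet) :
    pvSumFold ((PySem.List.enumerate w s).flatMap
        (fun p => PySem.Int.toChars
          (if PySem.Int.mod p.1 2 = 0 then pvValOf p.2 else 2 * pvValOf p.2))) (some r)
    = some (r + ((PySem.List.enumerate w s).map (fun p => pvContrib p.1 p.2)).sum) := by
  induction w generalizing s r with
  | nil => simp [PySem.List.enumerate_nil, pvSumFold]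
  | cons c t ih =>
    rw [PySem.List.enumerate_cons]
    simp only [List.flatMap_cons, List.map_cons, List.sum_cons]
    rw [pvSumFold_append, pvSumFold_digits (hall c List.mem_cons_self) s r]
    rw [ih (s + 1) _ (fun x hx => hall x (List.mem_cons_of_mem c hx))]
    congr 1
    ring

set_option maxRecDepth 8192 in
theorem pvBuildLoop_eq_enum (cs : List Char) (k : Nat) (hk : k ≤ cs.length) :
    pvBuildLoop cs (k : Int) =
      (PySem.List.enumerate (cs.take k)).foldl
        (fun acc (p : Int × Char) =>
          acc.bind fun ds =>
            (PySem.Dict.get? pvValues p.2).bind fun v =>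
              some (ds ++ PySem.Int.toChars (if PySem.Int.mod p.1 2 = 0 then v else 2 * v)))
        (some []) := by
  unfold pvBuildLoop
  rw [PySem.List.enumerate_eq_map_pyRange (cs.take k) 'x', List.foldl_map]
  have hlen : PySem.List.len (cs.take k) = (k : Int) := by
    simp [PySem.List.len]
    omega
  rw [hlen]
  refine PySem.List.foldl_congr_mem _ _ _ _ ?_
  intro acc i hi
  obtain ⟨h0, h1⟩ := PySem.List.mem_pyRange_one.mp hi
  have hlt : i < ((cs.take k).length : Int) := by simp; omega
  have hg : PySem.List.pyGet? cs i = some (PySem.List.pyGetD (cs.take k) i 'x') := by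
    rw [PySem.List.pyGet?_of_nonneg cs h0,
      PySem.List.pyGetD_eq_getElem (cs.take k) 'x' h0 hlt, List.getElem_take]
    exact List.getElem?_eq_getElem (by omega)
  simp only [hg, Option.bind_some]

theorem pvABlock_eq (cs : List Char) (k : Nat) (hk : k ≤ cs.length)
    (hall : ∀ c ∈ cs.take k, c ∈ pvCusipAlphabet) :
    pvABlock cs (k : Int) =
      some (PySem.Int.mod
        (10 - ((PySem.List.enumerate (cs.take k) 0).map (fun p => pvContrib p.1 p.2)).sum) 10) := by
  unfold pvABlock
  rw [pvBuildLoop_eq_enum cs k hk, pvBuild_enum (cs.take k) 0 [] hall]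
  simp only [List.nil_append, Option.bind_some]
  rw [pvSumLoop_eq_fold, pvSumFold_flat (cs.take k) 0 0 hall]
  simp only [Option.bind_some, zero_add]

theorem pvAlt_block (w : List Char) (hall : ∀ c ∈ w, c ∈ pvCusipAlphabet) :
    ((PySem.List.enumerate w 0).foldl
      (fun acc (p : Int × Char) =>
        acc.bind fun t =>
          (PySem.Dict.get? pvValues p.2).bind fun v0 =>
            let v := if PySem.Int.mod p.1 2 = 0 then v0 else 2 * v0
            some (t + PySem.Int.floordiv v 10 + PySem.Int.mod v 10))
      (some 0)).bind (fun total => some (PySem.Int.mod (10 - total) 10))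
    = some (PySem.Int.mod
        (10 - ((PySem.List.enumerate w 0).map (fun p => pvContrib p.1 p.2)).sum) 10) := by
  rw [pvB_enum w 0 0 hall]
  simp only [Option.bind_some, zero_add]

theorem pvAll_alpha {l : List Char} (h : (l.all fun c => c ∈ pvCusipAlphabet) = true) :
    ∀ c ∈ l, c ∈ pvCusipAlphabet :=
  fun c hc => of_decide_eq_true (List.all_eq_true.mp h c hc)

-- ===== VERDICT (by name: the statement is the Claim_ definition above) =====
theorem calculate_cusip_check_digit_spec : Claim_equal_calculate_cusip_check_digit := by
  intro cusip _ hpre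
  unfold Spec_calculate_cusip_check_digit calculate_cusip_check_digit calculate_cusip_check_digit_alt
  unfold Pre_calculate_cusip_check_digit at hpre
  dsimp only at hpre ⊢
  by_cases h8 : 8 ≤ cusip.toList.length
  · rw [if_pos h8] at hpre ⊢
    rw [if_pos h8]
    have hall := pvAll_alpha hpre
    rw [PySem.List.slice_to cusip.toList (by omega : (0:Int) ≤ 8)]
    have h88 : ((8:Int)).toNat = (8:Nat) := by omega
    rw [h88]
    rw [show ((8:Int)) = ((8:Nat) : Int) by omega, pvABlock_eq cusip.toList 8 h8 hall,
      (pvAlt_block (cusip.toList.take 8) hall).symm]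
    simp only [Option.bind_some]
  · rw [if_neg h8] at hpre ⊢
    rw [if_neg h8]
    by_cases h6 : 6 ≤ cusip.toList.length
    · rw [if_pos h6] at hpre ⊢
      rw [if_pos h6]
      have hall := pvAll_alpha hpre
      rw [PySem.List.slice_to cusip.toList (by omega : (0:Int) ≤ 6)]
      rw [show ((6:Int)).toNat = (6:Nat) by omega]
      rw [show ((6:Int)) = ((6:Nat) : Int) by omega, pvABlock_eq cusip.toList 6 h6 hall,
        (pvAlt_block (cusip.toList.take 6) hall).symm]
      simp only [Option.bind_some]
    · rw [if_neg h6] at hpre ⊢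
      rw [if_neg h6]
      by_cases h3 : 3 ≤ cusip.toList.length
      · rw [if_pos h3] at hpre ⊢
        rw [if_pos h3]
        have hallp := pvAll_alpha hpre
        set cs' : List Char :=
          List.replicate (9 - cusip.toList.length) '0' ++ cusip.toList with hcs'
        have hk : 8 ≤ cs'.length := by
          simp [hcs']
          omega
        have htake : cs'.take 8 =
            List.replicate (9 - cusip.toList.length) '0' ++
              cusip.toList.take (cusip.toList.length - 1) := by
          rw [hcs', List.take_append, List.take_replicate,
            List.length_replicate]
          congr 1
          · congr 1
            omega
          · congr 1
            omega
        have hall : ∀ c ∈ cs'.take 8, c ∈ pvCusipAlphabet := by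
          intro c hc
          rw [htake] at hc
          rcases List.mem_append.mp hc with h | h
          · rw [List.eq_of_mem_replicate h]
            decide
          · exact hallp c h
        rw [PySem.List.slice_to cs' (by omega : (0:Int) ≤ 8)]
        rw [show ((8:Int)).toNat = (8:Nat) by omega]
        rw [show ((8:Int)) = ((8:Nat) : Int) by omega, pvABlock_eq cs' 8 hk hall,
          (pvAlt_block (cs'.take 8) hall).symm]
        simp only [Option.bind_some]
      · rw [if_neg h3]
        rw [if_neg h3]
        rfl
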